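-- pv_equiv track=rewrite | github.com/GAneshGAikwad1112/Python_Logic_Building | X + Y/main.py | transform
-- ===== SOURCE A (Python) =====
-- def transform(b):
--     for i in range(len(b)-1):
--         if b[i]=='1':
--             b[i]='0'
--             if b[i + 1]=='0':
--                 b[i + 1] = '1'
--             else:
--                 b[i+1] = '1'
--
--     return b
-- ===== SOURCE B (Python) =====
-- def transform(b):
--     # Closed form: A's pass turns the first '1' among b[:-1] and everything
--     # after it (up to the second-to-last slot) into '0' and forces the last
--     # slot to '1'; with no such '1' nothing changes.  Same in-place mutation.
--     n = len(b)
--     for p in range(n - 1):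
--         if b[p] == '1':
--             b[p:n-1] = ['0'] * (n - 1 - p)
--             b[n-1] = '1'
--             break
--     return b
-- ===== Notes on version B (the rewrite author's own statement) =====
-- stated objective: simpler
-- what changed: Replaces the element-by-element carry simulation (flip each '1' to '0' and push a '1' rightward) with a closed form: find the first '1' before the last slot, overwrite the tail with zeros via one slice assignment and set the last element to '1'.
import Mathlib
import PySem

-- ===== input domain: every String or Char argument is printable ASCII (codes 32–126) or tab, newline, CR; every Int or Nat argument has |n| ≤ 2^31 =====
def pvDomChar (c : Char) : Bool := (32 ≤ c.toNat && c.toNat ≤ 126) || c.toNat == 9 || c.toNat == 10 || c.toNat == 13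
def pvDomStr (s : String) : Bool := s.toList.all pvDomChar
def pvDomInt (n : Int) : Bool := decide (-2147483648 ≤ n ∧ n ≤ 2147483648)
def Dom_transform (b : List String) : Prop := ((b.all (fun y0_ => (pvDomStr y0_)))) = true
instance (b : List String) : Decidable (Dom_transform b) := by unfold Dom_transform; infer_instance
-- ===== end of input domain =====

-- B replaces A's element-by-element carry pass with a closed form (first '1' before the
-- last slot zeroes the tail and forces the last slot to '1'); return-value equivalence is
-- proved (both Pythons mutate the argument in place identically).
-- ===== PORT A =====
def transformStep (acc : List String) (i : Nat) : List String :=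
  if acc.getD i "" = "1" then
    let acc1 := acc.set i "0"
    if acc1.getD (i + 1) "" = "0" then acc1.set (i + 1) "1" else acc1.set (i + 1) "1"
  else acc

def transform (b : List String) : List String :=
  (List.range (b.length - 1)).foldl transformStep b

-- ===== PORT B =====
def transform_alt (b : List String) : List String :=
  let n := b.length
  match (b.take (n - 1)).findIdx? (· == "1") with
  | none => b
  | some p => b.take p ++ List.replicate (n - 1 - p) "0" ++ ["1"]

-- ===== PRECONDITION & SPEC =====
def Spec_transform (b : List String) (out : List String) : Prop := out = transform_alt b
instance (b : List String) (out : List String) : Decidable (Spec_transform b out) := by unfold Spec_transform; infer_instance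

-- ===== CLAIM (what is proved, stated in full; the proofs are below) =====
def Claim_equal_transform : Prop := ∀ (b : List String), Dom_transform b → Spec_transform b (transform b)

-- ===== LEMMAS AND PROOFS =====

-- closed-form state of A's loop after processing indices 0 .. k-1
def specF (b : List String) (k : Nat) : List String :=
  match (b.take k).findIdx? (· == "1") with
  | none => b
  | some p => b.take p ++ List.replicate (k - p) "0" ++ "1" :: b.drop (k + 1)

lemma step_hit (l₁ l₂ : List String) (y : String) :
    transformStep (l₁ ++ "1" :: y :: l₂) l₁.length = l₁ ++ "0" :: "1" :: l₂ := by
  simp [transformStep, List.getD_eq_getElem?_getD]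

lemma step_miss (l₁ l₂ : List String) (x : String) (hx : x ≠ "1") :
    transformStep (l₁ ++ x :: l₂) l₁.length = l₁ ++ x :: l₂ := by
  simp [transformStep, List.getD_eq_getElem?_getD, hx]

lemma fold_spec (b : List String) (k : Nat) (hk : k ≤ b.length - 1) :
    (List.range k).foldl transformStep b = specF b k := by
  induction k with
  | zero => simp [specF]
  | succ k ih =>
    have hlen : k + 2 ≤ b.length := by omega
    have hkl : k < b.length := by omega
    have hk1 : k + 1 < b.length := by omega
    rw [List.range_succ, List.foldl_append, ih (by omega)]
    simp only [List.foldl_cons, List.foldl_nil]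
    have htake : b.take (k + 1) = b.take k ++ [b[k]] := by
      rw [List.take_add_one]; simp [hkl]
    unfold specF
    rw [htake, List.findIdx?_append]
    cases hfi : (b.take k).findIdx? (· == "1") with
    | none =>
      simp only [Option.none_or, Option.map]
      by_cases hb : b[k] = "1"
      · have hdrop : b.drop (k + 1) = b[k + 1] :: b.drop (k + 2) := by
          rw [← List.getElem_cons_drop hk1]
        have hb' : b = b.take k ++ "1" :: b[k + 1] :: b.drop (k + 2) := by
          conv_lhs => rw [← List.take_append_drop k b, ← List.getElem_cons_drop hkl]
          rw [hb, hdrop]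
        have hlt : (b.take k).length = k := List.length_take_of_le (by omega)
        have := step_hit (b.take k) (b.drop (k + 2)) b[k + 1]
        rw [hlt] at this
        conv_lhs => rw [hb']
        rw [this]
        simp [hb, List.length_take, Nat.min_eq_left (le_of_lt hkl)]
      · have hb' : b = b.take k ++ b[k] :: b.drop (k + 1) := by
          conv_lhs => rw [← List.take_append_drop k b, ← List.getElem_cons_drop hkl]
        have hlt : (b.take k).length = k := List.length_take_of_le (by omega)
        have := step_miss (b.take k) (b.drop (k + 1)) b[k] hb
        rw [hlt] at this
        conv_lhs => rw [hb']
        rw [this, ← hb']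
        simp [hb]
    | some p =>
      have hpk : p < k := by
        have := (List.findIdx?_eq_some_iff_findIdx_eq.mp hfi).1
        simpa [List.length_take, Nat.min_eq_left (le_of_lt hkl)] using this
      simp only [Option.some_or]
      have hdrop : b.drop (k + 1) = b[k + 1] :: b.drop (k + 2) := by
        rw [← List.getElem_cons_drop hk1]
      have hl₁ : (b.take p ++ List.replicate (k - p) "0").length = k := by
        simp [List.length_take, List.length_replicate]; omega
      have := step_hit (b.take p ++ List.replicate (k - p) "0") (b.drop (k + 2)) b[k + 1]
      rw [hl₁] at this
      rw [hdrop, this]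
      have hrep : List.replicate (k + 1 - p) ("0" : String)
          = List.replicate (k - p) "0" ++ ["0"] := by
        have : k + 1 - p = (k - p) + 1 := by omega
        rw [this, List.replicate_succ']
      rw [hrep]
      simp [List.append_assoc]

-- ===== VERDICT (by name: the statement is the Claim_ definition above) =====
theorem transform_spec : Claim_equal_transform := by
  intro b _
  show transform b = transform_alt b
  rw [transform, fold_spec b (b.length - 1) le_rfl]
  have hnil : b.drop (b.length - 1 + 1) = [] :=
    List.drop_eq_nil_of_le (by omega)
  unfold specF transform_alt
  cases h : (b.take (b.length - 1)).findIdx? (· == "1") <;> simp [h, hnil]
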